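-- pv_equiv track=rewrite | github.com/DexSparrow/Traceur.py | miniTrace.py | inserer
-- ===== SOURCE A (Python) =====
-- def inserer(text,intrus,balise):
-- 	i = 0
-- 	res = ""
-- 	y = len(text)
-- 	while (i < y):
-- 		if (i == balise):
-- 			res += (intrus)
-- 			res += (text[i])
-- 		else :
-- 			res += (text[i])
-- 		i += 1
-- 	res =  str(res)
-- 	return res
-- ===== SOURCE B (Python) =====
-- def inserer(text, intrus, balise):
--     if 0 <= balise < len(text):
--         return text[:balise] + intrus + text[balise:]
--     return text
-- ===== Notes on version B (the rewrite author's own statement) =====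
-- stated objective: faster
-- what changed: Replaces the character-by-character while loop that rebuilds the string with a single guarded slice concatenation text[:balise] + intrus + text[balise:] (text unchanged when balise is out of range, exactly as A's loop leaves it).
import Mathlib
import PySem

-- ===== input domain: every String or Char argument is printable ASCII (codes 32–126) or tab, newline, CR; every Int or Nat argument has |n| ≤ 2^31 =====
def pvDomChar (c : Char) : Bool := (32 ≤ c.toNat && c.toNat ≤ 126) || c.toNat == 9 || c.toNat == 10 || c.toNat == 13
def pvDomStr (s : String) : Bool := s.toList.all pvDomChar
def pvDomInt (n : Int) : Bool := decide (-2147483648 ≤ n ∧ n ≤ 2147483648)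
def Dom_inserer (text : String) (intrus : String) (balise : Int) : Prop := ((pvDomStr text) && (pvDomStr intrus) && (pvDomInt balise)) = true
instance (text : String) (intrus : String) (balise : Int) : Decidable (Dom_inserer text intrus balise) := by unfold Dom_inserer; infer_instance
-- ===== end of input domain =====

-- B replaces A's char-by-char copy loop with one guarded slice concatenation (simpler).

-- ===== PORT A =====
-- while loop over i = 0..len(text)-1, ported as a foldl over the enumerated characters
-- (the loop index i and text[i] are exactly the enumerate pairs); res accumulates chars.
def inserer (text : String) (intrus : String) (balise : Int) : String :=
  let res : List Char :=
    (PySem.List.enumerate text.toList 0).foldl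
      (fun res p =>
        if p.1 == balise then res ++ intrus.toList ++ [p.2]
        else res ++ [p.2]) []
  String.ofList res

-- ===== PORT B =====
def inserer_alt (text : String) (intrus : String) (balise : Int) : String :=
  if 0 ≤ balise ∧ balise < (text.toList.length : Int) then
    String.ofList (PySem.List.slice text.toList none (some balise) ++ intrus.toList
      ++ PySem.List.slice text.toList (some balise) none)
  else text

-- ===== PRECONDITION & SPEC =====
def Spec_inserer (text : String) (intrus : String) (balise : Int) (out : String) : Prop := out = inserer_alt text intrus balise
instance (text : String) (intrus : String) (balise : Int) (out : String) : Decidable (Spec_inserer text intrus balise out) := by unfold Spec_inserer; infer_instance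

-- ===== CLAIM (what is proved, stated in full; the proofs are below) =====
def Claim_equal_inserer : Prop := ∀ (text : String) (intrus : String) (balise : Int), Dom_inserer text intrus balise → Spec_inserer text intrus balise (inserer text intrus balise)

-- ===== LEMMAS AND PROOFS =====

-- The loop of A, started at index s with accumulator acc: it inserts ins before the
-- character at absolute index b when b falls inside [s, s + l.length), else copies l.
theorem inserer_loop (ins : List Char) (b : Int) (l : List Char) (s : Int) (acc : List Char) :
    (PySem.List.enumerate l s).foldl
      (fun res p =>
        if p.1 == b then res ++ ins ++ [p.2]
        else res ++ [p.2]) acc =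
    if s ≤ b ∧ b < s + l.length then
      acc ++ l.take (b - s).toNat ++ ins ++ l.drop (b - s).toNat
    else acc ++ l := by
  induction l generalizing s acc with
  | nil => simp
  | cons c t ih =>
    rw [PySem.List.enumerate_cons, List.foldl_cons]
    by_cases hb : s = b
    · subst hb
      simp only [beq_self_eq_true, if_true, ih]
      have h1 : ¬ (s + 1 ≤ s ∧ s < s + 1 + t.length) := by omega
      have h2 : s ≤ s ∧ s < s + ((c :: t).length : Int) := by
        simp only [List.length_cons]; push_cast; omega
      rw [if_neg h1, if_pos h2]
      simp
    · have : (s == b) = false := by simp [hb]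
      simp only [this, ih]
      by_cases h : s + 1 ≤ b ∧ b < s + 1 + t.length
      · have h2 : s ≤ b ∧ b < s + ((c :: t).length : Int) := by
          simp at h ⊢; omega
        rw [if_pos h, if_pos h2]
        have hbs : (b - s).toNat = (b - (s + 1)).toNat + 1 := by omega
        simp [hbs]
      · have h2 : ¬ (s ≤ b ∧ b < s + ((c :: t).length : Int)) := by
          simp at h ⊢; omega
        rw [if_neg h, if_neg h2]
        simp

-- ===== VERDICT (by name: the statement is the Claim_ definition above) =====
theorem inserer_spec : Claim_equal_inserer := by
  intro text intrus balise _
  unfold Spec_inserer inserer inserer_alt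
  rw [inserer_loop]
  by_cases h : 0 ≤ balise ∧ balise < (text.toList.length : Int)
  · have h' : (0 : Int) ≤ balise ∧ balise < 0 + (text.toList.length : Int) := by omega
    rw [if_pos h', if_pos h]
    simp [PySem.List.slice_to text.toList h.1, PySem.List.slice_from text.toList h.1]
  · have h' : ¬ ((0 : Int) ≤ balise ∧ balise < 0 + (text.toList.length : Int)) := by omega
    rw [if_neg h', if_neg h]
    simp
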